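-- pv_equiv track=rewrite | github.com/skrix/ap_p2_labs_iot_nulp | src/lab7/level2/naive.py | solution
-- ===== SOURCE A (Python) =====
-- def solution(haystack: str, needle: str) -> tuple[int, int]:
--     haystack_len = len(haystack) # string
--     needle_len = len(needle) # substring
--     comparisons = 0
--
--     if needle_len == 0:
--         return (None, 0)
--
--     if needle_len > haystack_len:
--         return (None, 0)
--
--     last_match_start_index = None
--     for i in range(haystack_len - needle_len + 1):
--         is_match = True
--         for j in range(needle_len):
--             comparisons += 1
--             if haystack[i + j] != needle[j]:
--                 is_match = False
--                 break
--
--         if is_match: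
--             last_match_start_index = i
--
--     if last_match_start_index != None:
--         return (last_match_start_index + needle_len, comparisons)
--     else:
--         return (None, comparisons)
-- ===== SOURCE B (Python) =====
-- def solution(haystack: str, needle: str) -> tuple[int, int]:
--     n = len(haystack)
--     m = len(needle)
--     if m == 0 or m > n:
--         return (None, 0)
--
--     def lcp(i):
--         k = 0
--         for hc, nc in zip(haystack[i:i + m], needle):
--             if hc != nc:
--                 break
--             k += 1
--         return k
--
--     ls = [lcp(i) for i in range(n - m + 1)]
--     comparisons = sum(min(l + 1, m) for l in ls)
--     last = max((i for i, l in enumerate(ls) if l == m), default=None)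
--     if last is None:
--         return (None, comparisons)
--     return (last + m, comparisons)
-- ===== Notes on version B (the rewrite author's own statement) =====
-- stated objective: alternative
-- what changed: A's stateful nested scan (match flag, break, running comparison counter, last-index overwrite) is replaced by computing the longest-common-prefix length at each alignment once, then deriving the comparison count arithmetically as sum of min(lcp+1, m) and the last match as max over indices with lcp == m.
import Mathlib
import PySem

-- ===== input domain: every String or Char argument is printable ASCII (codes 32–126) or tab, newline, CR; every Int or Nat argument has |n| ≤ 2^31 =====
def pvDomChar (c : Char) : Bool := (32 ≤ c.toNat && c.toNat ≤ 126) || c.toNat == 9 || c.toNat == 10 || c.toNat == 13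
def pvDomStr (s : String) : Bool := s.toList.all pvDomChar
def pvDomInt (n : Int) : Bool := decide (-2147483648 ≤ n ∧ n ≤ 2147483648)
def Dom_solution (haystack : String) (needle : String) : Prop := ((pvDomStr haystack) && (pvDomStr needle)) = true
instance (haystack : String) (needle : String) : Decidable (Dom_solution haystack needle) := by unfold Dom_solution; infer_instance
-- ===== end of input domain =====

-- B replaces A's stateful flag/break/counter scan by an lcp table from which the comparison
-- count is derived arithmetically and the last match by a max over matching indices
-- (alternative decomposition, same asymptotic cost).

-- ===== PORT A =====
-- A's inner loop 'for j in range(needle_len): …' with break; fuel = needle_len - j.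
-- Indexing ports haystack[i+j] / needle[j] via getElem? (in range at every call the outer loop makes).
def solInnerA (h nd : List Char) (i : Nat) : Nat → Nat → Int → Bool × Int
  | 0, _j, comps => (true, comps)
  | fuel + 1, j, comps =>
      let comps' := comps + 1
      if h[i + j]? ≠ nd[j]? then (false, comps')
      else solInnerA h nd i fuel (j + 1) comps'

-- A's outer loop 'for i in range(haystack_len - needle_len + 1)'
def solOuterA (h nd : List Char) : Nat → Nat → Option Nat → Int → Option Nat × Int
  | 0, _i, last, comps => (last, comps)
  | fuel + 1, i, last, comps =>
      let r := solInnerA h nd i nd.length 0 comps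
      solOuterA h nd fuel (i + 1) (if r.1 then some i else last) r.2

def solution (haystack : String) (needle : String) : Option Int × Int :=
  let h := haystack.toList
  let nd := needle.toList
  if nd.length = 0 then (none, 0)
  else if nd.length > h.length then (none, 0)
  else
    let r := solOuterA h nd (h.length - nd.length + 1) 0 none 0
    match r.1 with
    | some l => (some ((l : Int) + (nd.length : Int)), r.2)
    | none => (none, r.2)

-- ===== PORT B =====
-- Source B's lcp(i): zip of haystack[i:i+m] with needle, counting until first mismatch
def lcpChars : List Char → List Char → Nat
  | hc :: hs, nc :: ns => if hc ≠ nc then 0 else lcpChars hs ns + 1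
  | _, _ => 0

def solution_alt (haystack : String) (needle : String) : Option Int × Int :=
  let h := haystack.toList
  let nd := needle.toList
  let n := h.length
  let m := nd.length
  if m = 0 ∨ m > n then (none, 0)
  else
    -- the slice haystack[i:i+m] with 0 ≤ i and i+m ≤ n is exactly (h.drop i).take m
    let ls := (List.range (n - m + 1)).map (fun i => lcpChars ((h.drop i).take m) nd)
    let comparisons : Int := ls.foldl (fun (a : Int) l => a + ((min (l + 1) m : Nat) : Int)) 0
    let last := (ls.zipIdx).foldl
      (fun (a : Option Nat) li =>
        if li.1 = m then (match a with | none => some li.2 | some x => some (Nat.max x li.2)) else a)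
      none
    match last with
    | some i => (some ((i : Int) + (m : Int)), comparisons)
    | none => (none, comparisons)

-- ===== PRECONDITION & SPEC =====
def Spec_solution (haystack : String) (needle : String) (out : Option Int × Int) : Prop := out = solution_alt haystack needle
instance (haystack : String) (needle : String) (out : Option Int × Int) : Decidable (Spec_solution haystack needle out) := by unfold Spec_solution; infer_instance

-- ===== CLAIM (what is proved, stated in full; the proofs are below) =====
def Claim_equal_solution : Prop := ∀ (haystack : String) (needle : String), Dom_solution haystack needle → Spec_solution haystack needle (solution haystack needle)

-- ===== LEMMAS AND PROOFS =====

-- A's inner loop returns (whether the remaining needle suffix fully matches,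
-- comparisons advanced by min(lcp+1, fuel)) — the lcp characterisation B is built on.
theorem solInnerA_spec (h nd : List Char) (i : Nat) :
    ∀ (fuel j : Nat) (comps : Int), fuel + j = nd.length → i + nd.length ≤ h.length →
    solInnerA h nd i fuel j comps =
      (decide (lcpChars ((h.drop (i + j)).take fuel) (nd.drop j) = fuel),
       comps + ((min (lcpChars ((h.drop (i + j)).take fuel) (nd.drop j) + 1) fuel : Nat) : Int)) := by
  intro fuel
  induction fuel with
  | zero => intro j comps h1 h2; simp [solInnerA, lcpChars]
  | succ f ih =>
    intro j comps h1 h2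
    have hj : j < nd.length := by omega
    have hij : i + j < h.length := by omega
    have hd : h.drop (i+j) = h[i+j] :: h.drop (i+j+1) := List.drop_eq_getElem_cons hij
    have ndd : nd.drop j = nd[j] :: nd.drop (j+1) := List.drop_eq_getElem_cons hj
    rw [solInnerA, hd, ndd, List.getElem?_eq_getElem hij, List.getElem?_eq_getElem hj]
    simp only [List.take_succ_cons, lcpChars]
    by_cases hc : h[i+j] = nd[j]
    · simp only [hc, ne_eq, not_true_eq_false, if_false]
      rw [ih (j+1) (comps+1) (by omega) h2]
      have harg : i + (j+1) = i + j + 1 := by omega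
      rw [harg]
      set L := lcpChars ((h.drop (i+j+1)).take f) (nd.drop (j+1)) with hL
      refine Prod.ext ?_ ?_
      · simp
      · simp only []
        have : min (L + 1 + 1) (f + 1) = min (L + 1) f + 1 := by omega
        rw [this]; push_cast; ring
    · simp only [hc, ne_eq, not_false_eq_true, if_true]
      simp only [show (min (0+1) (f+1) : Nat) = 1 by omega]
      refine Prod.ext ?_ ?_ <;> simp [hc]

theorem foldl_add_init (g : Nat → Int) :
    ∀ (ls : List Nat) (s : Int), ls.foldl (fun a l => a + g l) s = s + ls.foldl (fun a l => a + g l) 0 := by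
  intro ls
  induction ls with
  | nil => intro s; simp
  | cons x xs ih => intro s; simp only [List.foldl_cons]; rw [ih (s + g x), ih (0 + g x)]; ring

-- A's outer loop equals B's two folds over the lcp table (generalised over start index and accumulators)
theorem solOuterA_spec (h nd : List Char) :
    ∀ (fuel i : Nat) (last : Option Nat) (comps : Int), i + fuel + nd.length ≤ h.length + 1 →
    solOuterA h nd fuel i last comps =
      ( (((List.range fuel).map (fun k => lcpChars ((h.drop (i + k)).take nd.length) nd)).zipIdx i).foldl
          (fun (a : Option Nat) li => if li.1 = nd.length then some li.2 else a) last,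
        comps + (((List.range fuel).map (fun k => lcpChars ((h.drop (i + k)).take nd.length) nd)).foldl
          (fun (a : Int) l => a + ((min (l + 1) nd.length : Nat) : Int)) 0) ) := by
  intro fuel
  induction fuel with
  | zero => intro i last comps _; simp [solOuterA]
  | succ f ih =>
    intro i last comps hb
    rw [solOuterA]
    have hbd : i + nd.length ≤ h.length := by omega
    rw [solInnerA_spec h nd i nd.length 0 comps rfl hbd]
    simp only [Nat.add_zero, List.drop_zero]
    rw [ih (i + 1) _ _ (by omega)]
    rw [List.range_succ_eq_map]
    simp only [List.map_cons, List.map_map, List.zipIdx_cons, List.foldl_cons, Nat.add_zero]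
    have hmap : ((List.range f).map ((fun k => lcpChars ((h.drop (i + k)).take nd.length) nd) ∘ Nat.succ))
        = (List.range f).map (fun k => lcpChars ((h.drop (i + 1 + k)).take nd.length) nd) := by
      apply List.map_congr_left; intro k _
      simp only [Function.comp]
      have : i + (k + 1) = i + 1 + k := by omega
      rw [Nat.succ_eq_add_one, this]
    rw [hmap]
    refine Prod.ext ?_ ?_
    · simp [decide_eq_true_eq]
    · simp only []
      rw [foldl_add_init _ _ (0 + _)]
      push_cast; ring

-- Source B's max over an ascending enumeration equals "keep the last matching index"
theorem maxfold_eq_lastfold (m : Nat) :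
    ∀ (ls : List Nat) (k : Nat) (a : Option Nat), (∀ x, a = some x → x < k) →
    ((ls.zipIdx k).foldl
        (fun (a : Option Nat) li =>
          if li.1 = m then (match a with | none => some li.2 | some x => some (Nat.max x li.2)) else a) a)
    = ((ls.zipIdx k).foldl (fun (a : Option Nat) li => if li.1 = m then some li.2 else a) a) := by
  intro ls
  induction ls with
  | nil => intro k a _; simp
  | cons x xs ih =>
    intro k a hinv
    simp only [List.zipIdx_cons, List.foldl_cons]
    by_cases hx : x = m
    · cases a with
      | none =>
          simp only [hx, reduceIte]
          exact ih (k + 1) (some k) (by intro z hz; cases hz; omega)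
      | some y =>
          have hy : y < k := hinv y rfl
          simp only [hx, reduceIte, Nat.max_eq_right (Nat.le_of_lt hy)]
          exact ih (k + 1) (some k) (by intro z hz; cases hz; omega)
    · simp only [if_neg hx]
      exact ih (k + 1) a (by intro z hz; exact Nat.lt_succ_of_lt (hinv z hz))

-- ===== VERDICT (by name: the statement is the Claim_ definition above) =====
theorem solution_spec : Claim_equal_solution := by
  intro hs nd _
  unfold Spec_solution solution solution_alt
  by_cases hm : nd.toList.length = 0
  · rw [if_pos hm, if_pos (Or.inl hm)]
  · by_cases hn : nd.toList.length > hs.toList.length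
    · rw [if_neg hm, if_pos hn, if_pos (Or.inr hn)]
    · rw [if_neg hm, if_neg hn, if_neg (by omega : ¬(nd.toList.length = 0 ∨ nd.toList.length > hs.toList.length))]
      rw [solOuterA_spec hs.toList nd.toList (hs.toList.length - nd.toList.length + 1) 0 none 0 (by omega)]
      simp only [zero_add]
      rw [maxfold_eq_lastfold nd.toList.length _ 0 none (by intro x hx; cases hx)]
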